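-- pv_equiv track=rewrite | github.com/ParasNingune/Advert-of-Code-2024 | Day-7/part1.py | totalResult
-- ===== SOURCE A (Python) =====
-- from itertools import product
--
-- def evaluateExpressions(numbers, operators):
--     result = numbers[0]
--
--     for i, operator in enumerate(operators):
--         if operator == "+":
--             result += numbers[i+1]
--         elif operator == "*":
--             result *= numbers[i+1]
--
--     return result
--
-- def totalResult(equations):
--
--     validEquations = []
--     operators = ["+", "*"]
--
--     for target, numbers in equations:
--         possible = False
--
--         for operator in product(operators, repeat=len(numbers) - 1):
--             if evaluateExpressions(numbers, operator) == target:
--                 possible = True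
--                 break
--         if possible:
--             validEquations.append(target)
--
--     return sum(validEquations)
-- ===== SOURCE B (Python) =====
-- def totalResult(equations):
--     # Incremental reachable-value set DP: one left-to-right pass per equation,
--     # deduplicating partial results, instead of enumerating all operator tuples.
--     total = 0
--     for target, numbers in equations:
--         reach = {numbers[0]}
--         for n in numbers[1:]:
--             reach = {r + n for r in reach} | {r * n for r in reach}
--         if target in reach:
--             total += target
--     return total
-- ===== Notes on version B (the rewrite author's own statement) =====
-- stated objective: faster
-- what changed: Replaces per-equation enumeration of all 2^(n-1) operator tuples (each re-evaluated from scratch) by a single left-to-right pass maintaining the deduplicated set of reachable partial values, which collapses coinciding partial results.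
-- outside the precondition, e.g. on totalResult([(5, [])]): A raises ValueError, B raises IndexError
import Mathlib
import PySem

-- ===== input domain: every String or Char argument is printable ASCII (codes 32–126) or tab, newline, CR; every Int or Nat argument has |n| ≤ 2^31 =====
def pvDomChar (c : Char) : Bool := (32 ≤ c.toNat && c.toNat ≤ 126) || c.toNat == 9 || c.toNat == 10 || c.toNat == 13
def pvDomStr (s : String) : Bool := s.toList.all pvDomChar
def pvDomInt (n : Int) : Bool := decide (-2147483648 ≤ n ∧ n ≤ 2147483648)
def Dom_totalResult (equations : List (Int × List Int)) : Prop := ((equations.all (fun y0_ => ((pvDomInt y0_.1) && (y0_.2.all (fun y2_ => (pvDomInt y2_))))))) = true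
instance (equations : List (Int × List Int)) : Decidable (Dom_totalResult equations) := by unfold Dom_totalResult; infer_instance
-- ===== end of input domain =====

-- B replaces enumeration of all operator tuples by a reachable-value set DP (one pass per equation); proved equal on equations whose number lists are nonempty.


-- ===== PORT A =====
-- itertools.product(["+","*"], repeat=k), first component varying slowest
def pvProd : Nat → List (List String)
  | 0 => [[]]
  | k + 1 => (["+", "*"] : List String).flatMap (fun o => (pvProd k).map (o :: ·))

-- evaluateExpressions: result = numbers[0], then result op= numbers[i+1] per operator
def pvEvalA : Int → List String → List Int → Int
  | r, [], _ => r
  | r, _ :: _, [] => r  -- never reached: ops has length numbers.length - 1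
  | r, o :: os, n :: ns =>
      pvEvalA (if o = "+" then r + n else if o = "*" then r * n else r) os ns

def pvStepA (valid : List Int) (te : Int × List Int) : List Int :=
  match te.2 with
  | [] => valid  -- Python raises ValueError here (product repeat=-1); excluded by Pre_
  | h :: t =>
      if (pvProd t.length).any (fun ops => pvEvalA h ops t == te.1) then
        valid ++ [te.1]
      else valid

def totalResult (equations : List (Int × List Int)) : Int :=
  (equations.foldl pvStepA []).sum

-- ===== PORT B =====
-- reach = {r + n for r in reach} | {r * n for r in reach}
def pvStepSet (s : PySem.Set Int) (n : Int) : PySem.Set Int :=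
  PySem.Set.ofList (s.map (· + n) ++ s.map (· * n))

def pvStepB (total : Int) (te : Int × List Int) : Int :=
  match te.2 with
  | [] => total  -- Python raises IndexError here (numbers[0]); excluded by Pre_
  | h :: t =>
      let reach := t.foldl pvStepSet (PySem.Set.ofList [h])
      if te.1 ∈ reach then total + te.1 else total

def totalResult_alt (equations : List (Int × List Int)) : Int :=
  equations.foldl pvStepB 0

-- ===== PRECONDITION & SPEC =====
-- Pre_ excludes equations whose numbers list is empty: there A raises ValueError and B raises IndexError.
def Pre_totalResult (equations : List (Int × List Int)) : Prop :=
  ∀ p ∈ equations, p.2 ≠ []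

instance (equations : List (Int × List Int)) : Decidable (Pre_totalResult equations) := by
  unfold Pre_totalResult; infer_instance

def pvWitness_totalResult : (List (Int × List Int)) := [(6, [2, 3]), (5, [1, 2, 2])]

def Spec_totalResult (equations : List (Int × List Int)) (out : Int) : Prop := out = totalResult_alt equations
instance (equations : List (Int × List Int)) (out : Int) : Decidable (Spec_totalResult equations out) := by unfold Spec_totalResult; infer_instance

-- ===== CLAIM (what is proved, stated in full; the proofs are below) =====
def Claim_equal_totalResult : Prop := ∀ (equations : List (Int × List Int)), Dom_totalResult equations → Pre_totalResult equations → Spec_totalResult equations (totalResult equations)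

-- ===== LEMMAS AND PROOFS =====

lemma mem_pvStepSet (s : PySem.Set Int) (n x : Int) :
    x ∈ pvStepSet s n ↔ ∃ r ∈ s, x = r + n ∨ x = r * n := by
  simp only [pvStepSet, PySem.Set.mem_ofList, List.mem_append, List.mem_map]
  constructor
  · rintro (⟨r, hr, rfl⟩ | ⟨r, hr, rfl⟩)
    · exact ⟨r, hr, Or.inl rfl⟩
    · exact ⟨r, hr, Or.inr rfl⟩
  · rintro ⟨r, hr, rfl | rfl⟩
    · exact Or.inl ⟨r, hr, rfl⟩
    · exact Or.inr ⟨r, hr, rfl⟩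

lemma mem_pvProd_succ (k : Nat) (ops : List String) :
    ops ∈ pvProd (k + 1) ↔ ∃ o os, (o = "+" ∨ o = "*") ∧ os ∈ pvProd k ∧ ops = o :: os := by
  simp only [pvProd, List.mem_flatMap, List.mem_map, List.mem_cons,
    List.not_mem_nil, or_false]
  constructor
  · rintro ⟨o, ho, os, hos, rfl⟩; exact ⟨o, os, ho, hos, rfl⟩
  · rintro ⟨o, os, ho, hos, rfl⟩; exact ⟨o, ho, os, hos, rfl⟩

-- reachable-set invariant: the folded set holds exactly the values of all operator tuples
lemma reach_iff (t : List Int) :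
    ∀ (s : PySem.Set Int) (x : Int),
      x ∈ t.foldl pvStepSet s ↔ ∃ r ∈ s, ∃ ops ∈ pvProd t.length, pvEvalA r ops t = x := by
  induction t with
  | nil =>
      intro s x
      simp [pvProd, pvEvalA]
  | cons n t ih =>
      intro s x
      simp only [List.foldl_cons, ih]
      constructor
      · rintro ⟨r', hr', ops, hops, hev⟩
        rcases (mem_pvStepSet s n r').1 hr' with ⟨r, hr, rfl | rfl⟩
        · exact ⟨r, hr, "+" :: ops,
            (mem_pvProd_succ _ _).2 ⟨"+", ops, Or.inl rfl, hops, rfl⟩, by simpa [pvEvalA] using hev⟩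
        · exact ⟨r, hr, "*" :: ops,
            (mem_pvProd_succ _ _).2 ⟨"*", ops, Or.inr rfl, hops, rfl⟩, by simpa [pvEvalA] using hev⟩
      · rintro ⟨r, hr, ops, hops, hev⟩
        rcases (mem_pvProd_succ _ _).1 (by simpa using hops) with ⟨o, os, ho, hos, rfl⟩
        rcases ho with rfl | rfl
        · exact ⟨r + n, (mem_pvStepSet s n _).2 ⟨r, hr, Or.inl rfl⟩, os, hos,
            by simpa [pvEvalA] using hev⟩
        · exact ⟨r * n, (mem_pvStepSet s n _).2 ⟨r, hr, Or.inr rfl⟩, os, hos,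
            by simpa [pvEvalA] using hev⟩

-- per-equation agreement: A's any-over-tuples equals B's membership test
lemma cond_agree (target h : Int) (t : List Int) :
    ((pvProd t.length).any (fun ops => pvEvalA h ops t == target))
      = decide (target ∈ t.foldl pvStepSet (PySem.Set.ofList [h])) := by
  have hmem : target ∈ t.foldl pvStepSet (PySem.Set.ofList [h])
      ↔ ∃ ops ∈ pvProd t.length, pvEvalA h ops t = target := by
    rw [reach_iff]
    constructor
    · rintro ⟨r, hr, ops, hops, hev⟩
      simp only [PySem.Set.mem_ofList, List.mem_singleton] at hr
      exact ⟨ops, hops, hr ▸ hev⟩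
    · rintro ⟨ops, hops, hev⟩
      exact ⟨h, by simp, ops, hops, hev⟩
  by_cases hc : target ∈ t.foldl pvStepSet (PySem.Set.ofList [h])
  · rcases hmem.1 hc with ⟨ops, hops, hev⟩
    simp [hc, List.any_eq_true]
    exact ⟨ops, hops, hev⟩
  · simp only [hc, decide_false]
    rw [List.any_eq_false]
    intro ops hops
    simp only [beq_iff_eq]
    intro hev
    exact hc (hmem.2 ⟨ops, hops, hev⟩)

lemma step_agree (valid : List Int) (total : Int) (te : Int × List Int) (hne : te.2 ≠ []) :
    valid.sum = total → (pvStepA valid te).sum = pvStepB total te := by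
  intro hsum
  obtain ⟨tg, nums⟩ := te
  match nums, hne with
  | h :: t, _ =>
      simp only [pvStepA, pvStepB, cond_agree tg h t]
      by_cases hc : tg ∈ t.foldl pvStepSet (PySem.Set.ofList [h]) <;>
        simp [hc, hsum]

lemma fold_agree (eqs : List (Int × List Int)) :
    ∀ (valid : List Int) (total : Int), (∀ p ∈ eqs, p.2 ≠ []) → valid.sum = total →
      (eqs.foldl pvStepA valid).sum = eqs.foldl pvStepB total := by
  induction eqs with
  | nil => intro valid total _ hsum; simpa using hsum
  | cons te eqs ih =>
      intro valid total hpre hsum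
      simp only [List.foldl_cons]
      exact ih _ _ (fun p hp => hpre p (List.mem_cons_of_mem _ hp))
        (step_agree valid total te (hpre te (List.mem_cons_self ..)) hsum)

-- ===== VERDICT (by name: the statement is the Claim_ definition above) =====
theorem totalResult_spec : Claim_equal_totalResult := by
  intro equations _ hpre
  unfold Spec_totalResult totalResult totalResult_alt
  exact fold_agree equations [] 0 hpre rfl
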